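-- pv_equiv track=rewrite | github.com/Cycyber/CCPS109---Computer-Science-1 | labs109.py | oware_move
-- ===== SOURCE A (Python) =====
-- def oware_move(board, house):  # Entirely From Class
--     stones, n = board[house], len(board)
--     pstn = house
--     board[house] = 0
--     while stones > 0:
--         j = 0
--         for i in range(pstn + 1, len(board)):
--             board[i] += 1
--             j = i
--             stones -= 1
--             if stones == 0:
--                 break
--         if stones > 0:
--             for i in range(house):
--                 board[i] += 1
--                 stones -= 1
--                 if stones == 0:
--                     break
--         else:
--             while board[j] in [2, 3] and j >= n / 2:
--                 board[j] = 0
--                 j -= 1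
--     return board
-- ===== SOURCE B (Python) =====
-- def oware_move(board, house):
--     # Closed-form sowing: each of the n-1 other houses gets s//(n-1) stones, plus one
--     # for the first s%(n-1) houses after `house` (computed as slice updates, no per-stone
--     # loop); landing house found arithmetically, then the same backward capture.
--     # Mutates `board` in place and returns it, like A.
--     n = len(board)
--     s = board[house]
--     board[house] = 0
--     if s <= 0:
--         return board
--     q, r = divmod(s, n - 1)
--     if q:
--         board[:] = [x + q for x in board]
--         board[house] = 0
--     end = house + r
--     if end < n:
--         board[house + 1:end + 1] = [x + 1 for x in board[house + 1:end + 1]]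
--     else:
--         board[house + 1:n] = [x + 1 for x in board[house + 1:n]]
--         board[0:end - n + 1] = [x + 1 for x in board[0:end - n + 1]]
--     j = house + (r if r > 0 else n - 1)
--     if j < n:
--         while 2 * j >= n and board[j] in (2, 3):
--             board[j] = 0
--             j -= 1
--     return board
-- ===== Notes on version B (the rewrite author's own statement) =====
-- stated objective: alternative
-- what changed: B replaces A's stone-by-stone sowing loop with a closed-form divmod distribution (one optional +q pass plus slice updates for the r extra stones) and an arithmetic landing-house computation, keeping the same backward capture scan.
-- outside the precondition, e.g. on oware_move([1, 2, 3], -1): A returns [2, 3, 1], B returns [3, 3, 0]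
import Mathlib
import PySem

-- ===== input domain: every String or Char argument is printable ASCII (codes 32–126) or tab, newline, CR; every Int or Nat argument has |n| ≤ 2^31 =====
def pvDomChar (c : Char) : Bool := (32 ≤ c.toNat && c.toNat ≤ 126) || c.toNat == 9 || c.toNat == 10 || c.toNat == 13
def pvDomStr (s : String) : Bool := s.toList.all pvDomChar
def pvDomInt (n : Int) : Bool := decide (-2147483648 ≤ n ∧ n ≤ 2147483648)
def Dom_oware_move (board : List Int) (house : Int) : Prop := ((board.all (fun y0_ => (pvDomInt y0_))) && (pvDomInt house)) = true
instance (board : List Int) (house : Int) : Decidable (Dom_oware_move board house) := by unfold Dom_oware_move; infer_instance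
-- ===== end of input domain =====

-- B replaces A's stone-by-stone sowing loop with a closed-form div/mod distribution (slice
-- updates) and an arithmetic landing house; like A it mutates `board` in place and returns
-- it (the theorems are about the RETURN value).

-- ===== PORT A =====
-- board[i] += 1 for a Nat loop index (always in range where A runs)
def pvIncAt (b : List Int) (i : Nat) : List Int := b.set i (b.getD i 0 + 1)

-- `for i in range(pstn+1, len(board)): board[i] += 1; j = i; stones -= 1; if stones == 0: break`
def pvSowUpper (n : Nat) (i : Nat) (b : List Int) (stones : Int) (j : Nat) :
    List Int × Int × Nat :=
  if _h : i < n then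
    let b' := pvIncAt b i
    let s' := stones - 1
    if s' = 0 then (b', s', i) else pvSowUpper n (i + 1) b' s' i
  else (b, stones, j)
termination_by n - i

-- `for i in range(house): board[i] += 1; stones -= 1; if stones == 0: break`
def pvSowLower (house : Nat) (i : Nat) (b : List Int) (stones : Int) : List Int × Int :=
  if _h : i < house then
    let b' := pvIncAt b i
    let s' := stones - 1
    if s' = 0 then (b', s') else pvSowLower house (i + 1) b' s'
  else (b, stones)
termination_by house - i

-- `while board[j] in [2, 3] and j >= n / 2: board[j] = 0; j -= 1`
-- (j >= n/2 on ints is 2*j >= n, exact; the j = 0 step can only fire when n = 0,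
--  where board[0] does not exist, so stopping there is unreachable behaviour)
def pvCapture (n : Nat) (j : Nat) (b : List Int) : List Int :=
  if (b.getD j 0 = 2 ∨ b.getD j 0 = 3) ∧ n ≤ 2 * j then
    if _h : j = 0 then b.set 0 0 else pvCapture n (j - 1) (b.set j 0)
  else b
termination_by j

-- `while stones > 0: …` — fuel = stones.toNat + 1 suffices: every lap that makes progress
-- consumes at least one stone; when no house can receive (n = 1), A loops forever (outside Pre_).
def pvLoop (house n : Nat) : Nat → List Int → Int → List Int
  | 0, b, _ => b
  | fuel + 1, b, stones =>
    if 0 < stones then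
      match pvSowUpper n (house + 1) b stones 0 with
      | (b1, s1, j) =>
        if 0 < s1 then
          match pvSowLower house 0 b1 s1 with
          | (b2, s2) => pvLoop house n fuel b2 s2
        else pvLoop house n fuel (pvCapture n j b1) s1
    else b

def oware_move (board : List Int) (house : Int) : List Int :=
  match PySem.List.pyGet? board house with
  | none => board  -- board[house] raises IndexError
  | some stones =>
    let n := board.length
    let b0 := PySem.List.pySetD board house 0   -- board[house] = 0
    pvLoop house.toNat n (stones.toNat + 1) b0 stones

-- ===== PORT B =====
-- `res[a:b] = [x + 1 for x in res[a:b]]` — exact for 0 <= a <= b <= len(res), the only way B uses it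
def pvSliceInc (xs : List Int) (a b : Nat) : List Int :=
  xs.take a ++ ((xs.drop a).take (b - a)).map (fun x => x + 1) ++ xs.drop b

-- `while 2 * j >= n and board[j] in (2, 3): board[j] = 0; j -= 1`
-- (as in A's port, the j = 0 stop is unreachable: it needs n = 0, where board[0] is absent)
def pvCaptureAlt (n : Nat) (j : Nat) (res : List Int) : List Int :=
  if n ≤ 2 * j ∧ (res.getD j 0 = 2 ∨ res.getD j 0 = 3) then
    if _h : j = 0 then res.set 0 0 else pvCaptureAlt n (j - 1) (res.set j 0)
  else res
termination_by j

def oware_move_alt (board : List Int) (house : Int) : List Int :=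
  match PySem.List.pyGet? board house with
  | none => board  -- board[house] raises IndexError
  | some s =>
    let n := board.length
    let b0 := PySem.List.pySetD board house 0       -- board[house] = 0
    if s ≤ 0 then b0
    else
      match PySem.Int.divmod? s ((n : Int) - 1) with
      | none => board  -- ZeroDivisionError (n = 1), outside Pre_
      | some (q, r) =>
        -- if q: board[:] = [x + q for x in board]; board[house] = 0
        let b1 := if q ≠ 0 then PySem.List.pySetD (b0.map (fun x => x + q)) house 0 else b0
        let e : Int := house + r
        -- the extra stone for the first r houses after `house`, as one or two slice updates
        let b2 := if e < (n : Int) then pvSliceInc b1 (house + 1).toNat (e + 1).toNat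
          else pvSliceInc (pvSliceInc b1 (house + 1).toNat n) 0 (e - (n : Int) + 1).toNat
        let j : Int := house + (if 0 < r then r else (n : Int) - 1)
        if j < (n : Int) then pvCaptureAlt n j.toNat b2 else b2

-- ===== PRECONDITION & SPEC =====
-- Pre_ restricts `house` to the game's natural domain 0 ≤ house < len(board): A raises
-- IndexError for house outside [-len, len) and its negative-index behaviour sows a pattern
-- no oware move has; it also excludes the one-house board with stones, on which A loops forever.
def Pre_oware_move (board : List Int) (house : Int) : Prop :=
  0 ≤ house ∧ house < board.length ∧ ¬(board.length = 1 ∧ 0 < board.getD 0 0)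
instance (board : List Int) (house : Int) : Decidable (Pre_oware_move board house) := by
  unfold Pre_oware_move; infer_instance

def pvWitness_oware_move : List Int × Int := ([4, 1, 2, 0], 0)

def Spec_oware_move (board : List Int) (house : Int) (out : List Int) : Prop :=
  out = oware_move_alt board house
instance (board : List Int) (house : Int) (out : List Int) : Decidable (Spec_oware_move board house out) := by
  unfold Spec_oware_move; infer_instance

-- ===== CLAIM (what is proved, stated in full; the proofs are below) =====
def Claim_equal_oware_move : Prop := ∀ (board : List Int) (house : Int),
  Dom_oware_move board house → Pre_oware_move board house →
  Spec_oware_move board house (oware_move board house)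

-- ===== LEMMAS AND PROOFS =====

-- add 1 to the `m` consecutive entries starting at index `i`
def pvBump (b : List Int) (i : Nat) : Nat → List Int
  | 0 => b
  | m + 1 => pvBump (pvIncAt b i) (i + 1) m

-- the board after the whole distribution, plus the capture when the landing house is upper
def pvFinalize (h n : Nat) (b : List Int) (s : Int) : List Int :=
  let q := PySem.Int.floordiv s ((n : Int) - 1)
  let r := PySem.Int.mod s ((n : Int) - 1)
  let d := (List.range n).map (fun i =>
    if i = h then b.getD i 0
    else b.getD i 0 + q + (if PySem.Int.mod ((i : Int) - (h : Int)) (n : Int) ≤ r then 1 else 0))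
  let k : Nat := if 0 < r then r.toNat else n - 1
  if h + k < n then pvCapture n (h + k) d else d

theorem pvBump_length (m i : Nat) (b : List Int) : (pvBump b i m).length = b.length := by
  induction m generalizing i b with
  | zero => rfl
  | succ m ih => simp [pvBump, ih, pvIncAt]

theorem pvBump_getD (m i t : Nat) (b : List Int) (ht : t < b.length) :
    (pvBump b i m).getD t 0 = b.getD t 0 + (if i ≤ t ∧ t < i + m then 1 else 0) := by
  induction m generalizing i b with
  | zero => simp [pvBump]
  | succ m ih =>
      rw [pvBump, ih _ _ (by simp [pvIncAt, ht])]
      by_cases hit : t = i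
      · subst hit
        simp [pvIncAt, List.getD_eq_getElem?_getD, ht]
      · have : (pvIncAt b i).getD t 0 = b.getD t 0 := by
          simp [pvIncAt, List.getD_eq_getElem?_getD, List.getElem?_set_ne (by omega : i ≠ t)]
        rw [this]
        have h1 : (i ≤ t ∧ t < i + (m + 1)) ↔ (i + 1 ≤ t ∧ t < i + 1 + m) := by omega
        simp only [h1]

theorem pvSowUpper_small_aux (n : Nat) : ∀ (k i : Nat) (b : List Int) (j0 : Nat),
    ((k : Int) + 1) ≤ (n : Int) - (i : Int) →
    pvSowUpper n i b ((k : Int) + 1) j0 = (pvBump b i (k + 1), 0, i + k) := by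
  intro k
  induction k with
  | zero =>
      intro i b j0 hle
      rw [pvSowUpper]
      simp [show i < n by omega, pvBump]
  | succ k ih =>
      intro i b j0 hle
      rw [pvSowUpper]
      have hin : i < n := by omega
      have hcast : ((k + 1 : Nat) : Int) + 1 - 1 = (k : Int) + 1 := by push_cast; ring
      rw [hcast]
      have hne : ¬ ((k : Int) + 1 = 0) := by omega
      simp only [hin, dif_pos, hne]
      rw [ih (i + 1) (pvIncAt b i) i (by push_cast [Nat.cast_add] at hle ⊢; omega)]
      have hb : pvBump (pvIncAt b i) (i + 1) (k + 1) = pvBump b i (k + 1 + 1) := rfl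
      rw [hb]
      simp only [if_false]
      have : i + 1 + k = i + (k + 1) := by omega
      rw [this]

theorem pvSowUpper_small (n : Nat) (s : Int) (hs : 0 < s) :
    ∀ (i : Nat) (b : List Int) (j0 : Nat), s ≤ (n : Int) - (i : Int) →
    pvSowUpper n i b s j0 = (pvBump b i s.toNat, 0, i + s.toNat - 1) := by
  intro i b j0 hle
  have hk : s = ((s.toNat - 1 : Nat) : Int) + 1 := by omega
  rw [hk, pvSowUpper_small_aux n (s.toNat - 1) i b j0 (by omega)]
  have h1 : s.toNat - 1 + 1 = s.toNat := by omega
  have h2 : i + (s.toNat - 1) = i + s.toNat - 1 := by omega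
  have h3 : (((s.toNat - 1 : Nat) : Int) + 1).toNat = s.toNat := by omega
  rw [h1, h2, h3]

theorem pvSowUpper_big_aux (n : Nat) : ∀ (d i : Nat) (b : List Int) (s : Int) (j0 : Nat),
    n - i = d → i ≤ n → (n : Int) - (i : Int) < s →
    pvSowUpper n i b s j0 = (pvBump b i (n - i), s - ((n : Int) - (i : Int)),
      if i < n then n - 1 else j0) := by
  intro d
  induction d with
  | zero =>
      intro i b s j0 hd hle hlt
      have hin : i = n := by omega
      subst hin
      rw [pvSowUpper]
      simp [pvBump]
  | succ d ih =>
      intro i b s j0 hd hle hlt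
      have hin : i < n := by omega
      have hs2 : ¬ (s - 1 = 0) := by
        have : (1 : Int) ≤ (n : Int) - (i : Int) := by push_cast; omega
        omega
      rw [pvSowUpper]
      simp only [hin, dif_pos, hs2]
      rw [ih (i + 1) (pvIncAt b i) (s - 1) i (by omega) (by omega) (by push_cast; push_cast at hlt; omega)]
      have e1 : pvBump (pvIncAt b i) (i + 1) (n - (i + 1)) = pvBump b i (n - i) := by
        have : n - i = (n - (i + 1)) + 1 := by omega
        rw [this]
        rfl
      have e2 : s - 1 - ((n : Int) - ((i : Nat) + 1 : Nat)) = s - ((n : Int) - (i : Int)) := by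
        push_cast; ring_nf
      have e3 : (if i + 1 < n then n - 1 else i) = n - 1 := by
        by_cases h : i + 1 < n
        · simp [h]
        · simp [h]; omega
      rw [e1, e2, e3]
      simp

theorem pvSowUpper_big (n : Nat) (i : Nat) (b : List Int) (s : Int) (j0 : Nat)
    (hle : i ≤ n) (hlt : (n : Int) - (i : Int) < s) :
    pvSowUpper n i b s j0 = (pvBump b i (n - i), s - ((n : Int) - (i : Int)),
      if i < n then n - 1 else j0) :=
  pvSowUpper_big_aux n (n - i) i b s j0 rfl hle hlt

theorem pvSowLower_small_aux (house : Nat) : ∀ (k i : Nat) (b : List Int),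
    ((k : Int) + 1) ≤ (house : Int) - (i : Int) →
    pvSowLower house i b ((k : Int) + 1) = (pvBump b i (k + 1), 0) := by
  intro k
  induction k with
  | zero =>
      intro i b hle
      rw [pvSowLower]
      simp [show i < house by omega, pvBump]
  | succ k ih =>
      intro i b hle
      rw [pvSowLower]
      have hin : i < house := by omega
      have hcast : ((k + 1 : Nat) : Int) + 1 - 1 = (k : Int) + 1 := by push_cast; ring
      rw [hcast]
      have hne : ¬ ((k : Int) + 1 = 0) := by omega
      simp only [hin, dif_pos, hne]
      rw [ih (i + 1) (pvIncAt b i) (by push_cast [Nat.cast_add] at hle ⊢; omega)]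
      simp only [if_false]
      rfl

theorem pvSowLower_small (house : Nat) (s : Int) (hs : 0 < s) :
    ∀ (i : Nat) (b : List Int), s ≤ (house : Int) - (i : Int) →
    pvSowLower house i b s = (pvBump b i s.toNat, 0) := by
  intro i b hle
  have hk : s = ((s.toNat - 1 : Nat) : Int) + 1 := by omega
  rw [hk, pvSowLower_small_aux house (s.toNat - 1) i b (by omega)]
  have h1 : s.toNat - 1 + 1 = (((s.toNat - 1 : Nat) : Int) + 1).toNat := by omega
  rw [h1]

theorem pvSowLower_big_aux (house : Nat) : ∀ (d i : Nat) (b : List Int) (s : Int),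
    house - i = d → i ≤ house → (house : Int) - (i : Int) < s →
    pvSowLower house i b s = (pvBump b i (house - i), s - ((house : Int) - (i : Int))) := by
  intro d
  induction d with
  | zero =>
      intro i b s hd hle hlt
      have hih : i = house := by omega
      subst hih
      rw [pvSowLower]
      simp [pvBump]
  | succ d ih =>
      intro i b s hd hle hlt
      have hin : i < house := by omega
      have hs2 : ¬ (s - 1 = 0) := by
        have : (1 : Int) ≤ (house : Int) - (i : Int) := by push_cast; omega
        omega
      rw [pvSowLower]
      simp only [hin, dif_pos, hs2]
      rw [ih (i + 1) (pvIncAt b i) (s - 1) (by omega) (by omega) (by push_cast; omega)]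
      have e1 : pvBump (pvIncAt b i) (i + 1) (house - (i + 1)) = pvBump b i (house - i) := by
        have : house - i = (house - (i + 1)) + 1 := by omega
        rw [this]
        rfl
      have e2 : s - 1 - ((house : Int) - ((i : Nat) + 1 : Nat)) = s - ((house : Int) - (i : Int)) := by
        push_cast; ring_nf
      rw [e1, e2]
      simp

theorem pvSowLower_big (house : Nat) (i : Nat) (b : List Int) (s : Int)
    (hle : i ≤ house) (hlt : (house : Int) - (i : Int) < s) :
    pvSowLower house i b s = (pvBump b i (house - i), s - ((house : Int) - (i : Int))) :=
  pvSowLower_big_aux house (house - i) i b s rfl hle hlt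

theorem pvCapture_eq_alt (n : Nat) : ∀ (j : Nat) (b : List Int),
    pvCapture n j b = pvCaptureAlt n j b := by
  intro j
  induction j using Nat.strong_induction_on with
  | _ j ih =>
    intro b
    rw [pvCapture, pvCaptureAlt]
    by_cases hc : (b.getD j 0 = 2 ∨ b.getD j 0 = 3) ∧ n ≤ 2 * j
    · have hc' : n ≤ 2 * j ∧ (b.getD j 0 = 2 ∨ b.getD j 0 = 3) := ⟨hc.2, hc.1⟩
      rw [if_pos hc, if_pos hc']
      by_cases hj : j = 0
      · simp [hj]
      · simp only [hj, dite_false]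
        rw [ih (j - 1) (by omega)]
    · have hc' : ¬ (n ≤ 2 * j ∧ (b.getD j 0 = 2 ∨ b.getD j 0 = 3)) := by tauto
      rw [if_neg hc, if_neg hc']

-- pointwise extensionality via getD, the form the bump/dist lemmas produce
theorem pvExt (xs ys : List Int) (hl : xs.length = ys.length)
    (h : ∀ t, t < xs.length → xs.getD t 0 = ys.getD t 0) : xs = ys := by
  apply List.ext_getElem hl
  intro t h1 h2
  have := h t h1
  rwa [List.getD_eq_getElem?_getD, List.getD_eq_getElem?_getD,
    List.getElem?_eq_getElem h1, List.getElem?_eq_getElem h2] at this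

-- (i - house) % n for 0 ≤ house, i < n: the sowing position, 1..n-1 off the house
theorem pvMod_shift (h n t : Nat) (hh : h < n) (ht : t < n) (hth : t ≠ h) :
    PySem.Int.mod ((t : Int) - (h : Int)) (n : Int) =
      if h < t then (t : Int) - (h : Int) else (t : Int) - (h : Int) + (n : Int) := by
  have hn : (0 : Int) < (n : Int) := by exact_mod_cast Nat.lt_of_le_of_lt (Nat.zero_le h) hh
  rw [PySem.Int.mod_eq_emod_of_pos hn]
  by_cases hlt : h < t
  · rw [if_pos hlt]
    exact Int.emod_eq_of_lt (by push_cast; omega) (by push_cast; omega)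
  · rw [if_neg hlt]
    have : ((t : Int) - (h : Int)) % (n : Int) = ((t : Int) - (h : Int) + (n : Int)) % (n : Int) := by
      rw [Int.add_emod_right]
    rw [this]
    exact Int.emod_eq_of_lt (by push_cast; omega) (by push_cast; omega)

theorem pvLoop_nonpos (house n fuel : Nat) (b : List Int) (s : Int) (hs : s ≤ 0) :
    pvLoop house n fuel b s = b := by
  cases fuel with
  | zero => rfl
  | succ fuel => simp [pvLoop, show ¬ 0 < s by omega]

theorem pvDiv_small (x d : Int) (h0 : 0 ≤ x) (hlt : x < d) :
    PySem.Int.floordiv x d = 0 ∧ PySem.Int.mod x d = x := by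
  have hd : 0 < d := lt_of_le_of_lt h0 hlt
  rw [PySem.Int.floordiv_eq_ediv_of_pos hd, PySem.Int.mod_eq_emod_of_pos hd]
  exact ⟨Int.ediv_eq_zero_of_lt h0 hlt, Int.emod_eq_of_lt h0 hlt⟩

theorem pvDiv_self (d : Int) (hd : 0 < d) :
    PySem.Int.floordiv d d = 1 ∧ PySem.Int.mod d d = 0 := by
  rw [PySem.Int.floordiv_eq_ediv_of_pos hd, PySem.Int.mod_eq_emod_of_pos hd]
  exact ⟨Int.ediv_self (by omega), by simp⟩

theorem pvDiv_sub (x d : Int) (hd : 0 < d) :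
    PySem.Int.floordiv (x - d) d = PySem.Int.floordiv x d - 1 ∧
    PySem.Int.mod (x - d) d = PySem.Int.mod x d := by
  rw [PySem.Int.floordiv_eq_ediv_of_pos hd, PySem.Int.floordiv_eq_ediv_of_pos hd,
    PySem.Int.mod_eq_emod_of_pos hd, PySem.Int.mod_eq_emod_of_pos hd]
  constructor
  · have : x - d = x + (-1) * d := by ring
    rw [this, Int.add_mul_ediv_right x (-1) (by omega)]
    ring
  · exact Int.sub_emod_right x d

-- terminal lap, stones run out among the upper houses: capture at the landing house
theorem pvFinalize_upper (h n : Nat) (hn : 2 ≤ n) (hh : h < n) (b : List Int)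
    (hb : b.length = n) (s : Int) (hs : 0 < s) (hA : s ≤ (n : Int) - (h : Int) - 1) :
    pvFinalize h n b s = pvCapture n (h + s.toNat) (pvBump b (h + 1) s.toNat) := by
  simp only [pvFinalize]
  have hqr : (PySem.Int.floordiv s ((n : Int) - 1) = 0 ∧ PySem.Int.mod s ((n : Int) - 1) = s ∧ s < (n : Int) - 1)
      ∨ (PySem.Int.floordiv s ((n : Int) - 1) = 1 ∧ PySem.Int.mod s ((n : Int) - 1) = 0 ∧ s = (n : Int) - 1 ∧ h = 0) := by
    by_cases hcase : s < (n : Int) - 1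
    · exact Or.inl ⟨(pvDiv_small s _ (by omega) hcase).1, (pvDiv_small s _ (by omega) hcase).2, hcase⟩
    · have hse : s = (n : Int) - 1 := by omega
      have hz : h = 0 := by omega
      exact Or.inr ⟨hse ▸ (pvDiv_self _ (by omega)).1, hse ▸ (pvDiv_self _ (by omega)).2, hse, hz⟩
  have hkk : (if 0 < PySem.Int.mod s ((n : Int) - 1) then (PySem.Int.mod s ((n : Int) - 1)).toNat else n - 1) = s.toNat := by
    rcases hqr with ⟨_, hr, _⟩ | ⟨_, hr, hse, hz⟩
    · rw [hr, if_pos hs]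
    · rw [hr]; simp; omega
  rw [hkk]
  rw [if_pos (by omega : h + s.toNat < n)]
  congr 1
  apply pvExt
  · simp [pvBump_length, hb]
  · intro t htl
    simp only [List.length_map, List.length_range] at htl
    rw [PySem.List.getD_map_range _ n t 0 htl, pvBump_getD _ _ _ _ (by omega)]
    by_cases hth : t = h
    · subst hth
      rw [if_pos rfl]
      have hno : ¬ (t + 1 ≤ t ∧ t < t + 1 + s.toNat) := by omega
      rw [if_neg hno]
      ring
    · rw [if_neg hth, pvMod_shift h n t hh htl hth]
      rcases hqr with ⟨hq, hr, hlt'⟩ | ⟨hq, hr, hse, hz⟩ <;> rw [hq, hr] <;> split_ifs <;> push_cast <;> omega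

-- terminal lap, stones run out among the lower houses: no capture
theorem pvFinalize_lower (h n : Nat) (hn : 2 ≤ n) (hh : h < n) (b : List Int)
    (hb : b.length = n) (s : Int) (hs : (n : Int) - (h : Int) - 1 < s) (hB : s ≤ (n : Int) - 1) :
    pvFinalize h n b s = pvBump (pvBump b (h + 1) (n - (h + 1))) 0 (s - ((n : Int) - (h : Int) - 1)).toNat := by
  simp only [pvFinalize]
  have hh0 : 0 < h := by omega
  have hqr : (PySem.Int.floordiv s ((n : Int) - 1) = 0 ∧ PySem.Int.mod s ((n : Int) - 1) = s ∧ s < (n : Int) - 1)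
      ∨ (PySem.Int.floordiv s ((n : Int) - 1) = 1 ∧ PySem.Int.mod s ((n : Int) - 1) = 0 ∧ s = (n : Int) - 1) := by
    by_cases hcase : s < (n : Int) - 1
    · exact Or.inl ⟨(pvDiv_small s _ (by omega) hcase).1, (pvDiv_small s _ (by omega) hcase).2, hcase⟩
    · have hse : s = (n : Int) - 1 := by omega
      exact Or.inr ⟨hse ▸ (pvDiv_self _ (by omega)).1, hse ▸ (pvDiv_self _ (by omega)).2, hse⟩
  have hnc : ¬ (h + (if 0 < PySem.Int.mod s ((n : Int) - 1) then (PySem.Int.mod s ((n : Int) - 1)).toNat else n - 1) < n) := by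
    rcases hqr with ⟨_, hr, _⟩ | ⟨_, hr, hse⟩
    · rw [hr, if_pos (by omega)]; omega
    · rw [hr]; simp; omega
  rw [if_neg hnc]
  symm
  apply pvExt
  · rw [pvBump_length, pvBump_length]
    simp [hb]
  · intro t htl
    rw [pvBump_length, pvBump_length, hb] at htl
    rw [pvBump_getD _ _ _ _ (by simp [pvBump_length]; omega),
      pvBump_getD _ _ _ _ (by omega)]
    rw [PySem.List.getD_map_range _ n t 0 htl]
    by_cases hth : t = h
    · subst hth
      rw [if_pos rfl]
      have h1 : ¬ (t + 1 ≤ t ∧ t < t + 1 + (n - (t + 1))) := by omega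
      have h2 : ¬ (0 ≤ t ∧ t < 0 + (s - ((n : Int) - (t : Int) - 1)).toNat) := by omega
      rw [if_neg h1, if_neg h2]
      ring
    · rw [if_neg hth]
      rw [pvMod_shift h n t hh htl hth]
      rcases hqr with ⟨hq, hr, hlt'⟩ | ⟨hq, hr, hse⟩ <;> rw [hq, hr] <;> split_ifs <;> push_cast <;> omega

-- a full lap adds one stone to every house but `h` and removes n-1 stones
theorem pvFinalize_lap (h n : Nat) (hn : 2 ≤ n) (hh : h < n) (b : List Int)
    (hb : b.length = n) (s : Int) (hs : (n : Int) - 1 < s) :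
    pvFinalize h n (pvBump (pvBump b (h + 1) (n - (h + 1))) 0 h) (s - ((n : Int) - 1)) =
    pvFinalize h n b s := by
  simp only [pvFinalize]
  have hd : (0 : Int) < (n : Int) - 1 := by push_cast; omega
  have hq := (pvDiv_sub s _ hd).1
  have hr := (pvDiv_sub s _ hd).2
  rw [hq, hr]
  have hdist : (List.range n).map (fun i =>
      if i = h then (pvBump (pvBump b (h + 1) (n - (h + 1))) 0 h).getD i 0
      else (pvBump (pvBump b (h + 1) (n - (h + 1))) 0 h).getD i 0 + (PySem.Int.floordiv s ((n : Int) - 1) - 1) +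
        (if PySem.Int.mod ((i : Int) - (h : Int)) (n : Int) ≤ PySem.Int.mod s ((n : Int) - 1) then 1 else 0)) =
      (List.range n).map (fun i =>
      if i = h then b.getD i 0
      else b.getD i 0 + PySem.Int.floordiv s ((n : Int) - 1) +
        (if PySem.Int.mod ((i : Int) - (h : Int)) (n : Int) ≤ PySem.Int.mod s ((n : Int) - 1) then 1 else 0)) := by
    apply List.map_congr_left
    intro t htm
    have htl : t < n := List.mem_range.mp htm
    rw [pvBump_getD _ _ _ _ (by simp [pvBump_length]; omega),
      pvBump_getD _ _ _ _ (by omega)]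
    by_cases hth : t = h
    · subst hth
      have h1 : ¬ (t + 1 ≤ t ∧ t < t + 1 + (n - (t + 1))) := by omega
      have h2 : ¬ (0 ≤ t ∧ t < 0 + t) := by omega
      rw [if_pos rfl, if_pos rfl, if_neg h1, if_neg h2]
      ring
    · rw [if_neg hth, if_neg hth]
      split_ifs <;> push_cast <;> omega
  rw [hdist]

-- the main simulation lemma: A's lap loop computes the closed form
theorem pvLoop_spec (h n : Nat) (hn : 2 ≤ n) (hh : h < n) :
    ∀ (m : Nat) (s : Int) (b : List Int), b.length = n → 0 < s → s ≤ (m : Int) →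
    pvLoop h n m b s = pvFinalize h n b s := by
  intro m
  induction m with
  | zero =>
      intro s b hb hs hm
      exfalso
      omega
  | succ m ih =>
      intro s b hb hs hm
      rw [pvLoop, if_pos hs]
      by_cases hA : s ≤ (n : Int) - (h : Int) - 1
      · -- stones run out among the upper houses: capture
        rw [pvSowUpper_small n s hs (h + 1) b 0 (by push_cast; omega)]
        have hidx : h + 1 + s.toNat - 1 = h + s.toNat := by omega
        rw [pvFinalize_upper h n hn hh b hb s hs hA, ← hidx]
        exact pvLoop_nonpos h n m _ 0 (by omega)
      · rw [pvSowUpper_big n (h + 1) b s 0 (by omega) (by push_cast; omega)]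
        have hs1 : (0 : Int) < s - ((n : Int) - ((h + 1 : Nat) : Int)) := by push_cast; push_cast at hA; omega
        dsimp only
        rw [if_pos hs1]
        by_cases hB : s ≤ (n : Int) - 1
        · -- stones run out among the lower houses: no capture
          rw [pvSowLower_small h _ hs1 0 _ (by push_cast; omega)]
          rw [pvFinalize_lower h n hn hh b hb s (by omega) hB]
          have hc : s - ((n : Int) - ((h + 1 : Nat) : Int)) = s - ((n : Int) - (h : Int) - 1) := by
            push_cast; ring
          rw [hc] at *
          exact pvLoop_nonpos h n m _ 0 (by omega)
        · -- a full lap, then recurse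
          rw [pvSowLower_big h 0 _ _ (by omega) (by push_cast; push_cast at hB; omega)]
          have hc2 : s - ((n : Int) - ((h + 1 : Nat) : Int)) - ((h : Int) - ((0 : Nat) : Int)) =
              s - ((n : Int) - 1) := by push_cast; ring
          rw [hc2]
          have hlen2 : (pvBump (pvBump b (h + 1) (n - (h + 1))) 0 (h - 0)).length = n := by
            rw [pvBump_length, pvBump_length, hb]
          rw [ih (s - ((n : Int) - 1)) _ hlen2 (by push_cast; push_cast at hB; omega)
            (by push_cast; push_cast at hm; omega)]
          have hz : h - 0 = h := by omega
          rw [hz]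
          exact pvFinalize_lap h n hn hh b hb s (by omega)

-- ===== VERDICT (by name: the statement is the Claim_ definition above) =====
theorem pvSet_getD (board : List Int) (h t : Nat) (ht : t < board.length) :
    (board.set h 0).getD t 0 = if t = h then 0 else board.getD t 0 := by
  by_cases hth : t = h
  · subst hth
    simp [List.getD_eq_getElem?_getD, ht]
  · rw [if_neg hth, List.getD_eq_getElem?_getD, List.getElem?_set,
      if_neg (fun (e : h = t) => hth e.symm), List.getD_eq_getElem?_getD]

theorem pvMapAdd_getD (xs : List Int) (q : Int) (t : Nat) (ht : t < xs.length) :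
    (xs.map (fun x => x + q)).getD t 0 = xs.getD t 0 + q := by
  rw [List.getD_eq_getElem?_getD, List.getElem?_map, List.getElem?_eq_getElem ht,
    List.getD_eq_getElem?_getD, List.getElem?_eq_getElem ht]
  rfl

theorem pvSliceInc_length (xs : List Int) (a b : Nat) (hab : a ≤ b) (hb : b ≤ xs.length) :
    (pvSliceInc xs a b).length = xs.length := by
  simp [pvSliceInc]
  omega

theorem pvSliceInc_getD (xs : List Int) (a b t : Nat) (hab : a ≤ b) (hb : b ≤ xs.length)
    (ht : t < xs.length) :
    (pvSliceInc xs a b).getD t 0 = xs.getD t 0 + (if a ≤ t ∧ t < b then 1 else 0) := by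
  have hmin : a.min xs.length = a := Nat.min_eq_left (by omega)
  have hmin2 : (b - a).min (xs.length - a) = b - a := Nat.min_eq_left (by omega)
  unfold pvSliceInc
  rw [List.getD_eq_getElem?_getD, List.getD_eq_getElem?_getD, List.append_assoc]
  by_cases h1 : t < a
  · rw [List.getElem?_append_left (by simp [hmin]; omega), List.getElem?_take]
    simp [h1, show ¬ (a ≤ t ∧ t < b) by omega]
  · rw [List.getElem?_append_right (by simp [hmin]; omega)]
    simp only [List.length_take, hmin]
    by_cases h2 : t < b
    · rw [List.getElem?_append_left (by simp [hmin2]; omega), List.getElem?_map]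
      rw [List.getElem?_take, List.getElem?_drop]
      have e1 : t - a < b - a := by omega
      have e2 : a + (t - a) = t := by omega
      simp only [e1, if_pos, e2]
      rw [List.getElem?_eq_getElem ht]
      simp [show a ≤ t ∧ t < b by omega]
    · rw [List.getElem?_append_right (by simp [hmin2]; omega), List.getElem?_drop]
      simp only [List.length_map, List.length_take, List.length_drop, hmin2]
      have e3 : b + (t - a - (b - a)) = t := by omega
      rw [e3, List.getElem?_eq_getElem ht]
      simp [show ¬ (a ≤ t ∧ t < b) by omega]

theorem oware_move_spec : Claim_equal_oware_move := by
  intro board house hdom hpre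
  obtain ⟨h0, h1, h2⟩ := hpre
  unfold Spec_oware_move
  have hlt : house.toNat < board.length := by omega
  have hcast : ((house.toNat : Nat) : Int) = house := Int.toNat_of_nonneg h0
  have hget : PySem.List.pyGet? board house = some (board.getD house.toNat 0) := by
    rw [PySem.List.pyGet?_eq_some_getElem board h0 h1]
    rw [List.getD_eq_getElem?_getD, List.getElem?_eq_getElem hlt]
    rfl
  simp only [oware_move, oware_move_alt, hget]
  rw [PySem.List.pySetD_of_nonneg board 0 h0]
  set h := house.toNat with hh
  set n := board.length with hn
  set stones := board.getD h 0 with hstones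
  by_cases hsp : 0 < stones
  · -- stones to sow
    have hn2 : 2 ≤ n := by
      rcases Nat.lt_or_ge n 2 with hlt2 | hge
      · exfalso
        have hn1 : n = 1 := by omega
        have hh0 : h = 0 := by omega
        rw [hh0] at hstones
        exact h2 ⟨hn1, by omega⟩
      · exact hge
    rw [pvLoop_spec h n hn2 hlt (stones.toNat + 1) stones (board.set h 0)
      (by simp [hn]) hsp (by omega)]
    rw [if_neg (by omega : ¬ stones ≤ 0)]
    have hne : ((n : Int) - 1) ≠ 0 := by push_cast; omega
    have hdm : PySem.Int.divmod? stones ((n : Int) - 1) =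
        some (PySem.Int.floordiv stones ((n : Int) - 1), PySem.Int.mod stones ((n : Int) - 1)) := by
      simp [PySem.Int.divmod?, hne, PySem.Int.floordiv, PySem.Int.mod]
    rw [hdm]
    dsimp only
    simp only [pvFinalize]
    rw [← hcast, PySem.List.pySetD_natCast]
    set q := PySem.Int.floordiv stones ((n : Int) - 1) with hq
    set r := PySem.Int.mod stones ((n : Int) - 1) with hr
    have hrnn : 0 ≤ r := PySem.Int.mod_nonneg stones (by push_cast; omega)
    have hrlt : r < (n : Int) - 1 := PySem.Int.mod_lt stones (by push_cast; omega)
    -- the board after the q-round, pointwise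
    set b1 := (if q ≠ 0 then ((board.set h 0).map (fun x => x + q)).set h 0
      else board.set h 0) with hb1def
    have hb1len : b1.length = n := by
      rw [hb1def]
      by_cases hq0 : q ≠ 0 <;> simp [hq0, hn]
    have hb1getD : ∀ t, t < n → b1.getD t 0 = if t = h then 0 else board.getD t 0 + q := by
      intro t htl
      rw [hb1def]
      by_cases hq0 : q ≠ 0
      · rw [if_pos hq0, pvSet_getD _ h t (by simp [hn]; omega)]
        by_cases hth : t = h
        · simp [hth]
        · rw [if_neg hth, if_neg hth, pvMapAdd_getD _ q t (by simp [hn]; omega),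
            pvSet_getD board h t (by omega), if_neg hth]
      · push_neg at hq0
        rw [if_neg (by simp [hq0]), pvSet_getD board h t (by omega)]
        by_cases hth : t = h
        · simp [hth]
        · simp [hth, hq0]
    -- Nat forms of B's slice bounds
    have ht1 : ((h : Int) + 1).toNat = h + 1 := by omega
    have ht2 : ((h : Int) + r + 1).toNat = h + r.toNat + 1 := by omega
    have ht3 : ((h : Int) + r - (n : Int) + 1).toNat = h + r.toNat + 1 - n := by omega
    rw [ht1, ht2, ht3]
    -- the distributed board equals B's slice-updated board
    have hd : (List.range n).map (fun i =>
        if i = h then (board.set h 0).getD i 0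
        else (board.set h 0).getD i 0 + q +
          (if PySem.Int.mod ((i : Int) - (h : Int)) (n : Int) ≤ r then 1 else 0)) =
        (if (h : Int) + r < (n : Int) then pvSliceInc b1 (h + 1) (h + r.toNat + 1)
          else pvSliceInc (pvSliceInc b1 (h + 1) n) 0 (h + r.toNat + 1 - n)) := by
      by_cases hE : (h : Int) + r < (n : Int)
      · rw [if_pos hE]
        apply pvExt
        · rw [pvSliceInc_length _ _ _ (by omega) (by omega)]
          simp [hb1len]
        · intro t htl
          simp only [List.length_map, List.length_range] at htl
          rw [PySem.List.getD_map_range _ n t 0 htl,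
            pvSliceInc_getD _ _ _ _ (by omega) (by omega) (by omega),
            hb1getD t htl, pvSet_getD board h t (by omega)]
          by_cases hth : t = h
          · rw [if_pos hth, if_pos hth, if_pos hth]
            rw [if_neg (by omega : ¬ (h + 1 ≤ t ∧ t < h + r.toNat + 1))]
            ring
          · rw [if_neg hth, if_neg hth, if_neg hth, pvMod_shift h n t hlt htl hth]
            split_ifs <;> push_cast <;> omega
      · rw [if_neg hE]
        apply pvExt
        · rw [pvSliceInc_length _ _ _ (by omega)
            (by rw [pvSliceInc_length _ _ _ (by omega) (by omega)]; omega),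
            pvSliceInc_length _ _ _ (by omega) (by omega)]
          simp [hb1len]
        · intro t htl
          simp only [List.length_map, List.length_range] at htl
          rw [PySem.List.getD_map_range _ n t 0 htl,
            pvSliceInc_getD _ _ _ _ (by omega)
              (by rw [pvSliceInc_length _ _ _ (by omega) (by omega)]; omega)
              (by rw [pvSliceInc_length _ _ _ (by omega) (by omega)]; omega),
            pvSliceInc_getD _ _ _ _ (by omega) (by omega) (by omega),
            hb1getD t htl, pvSet_getD board h t (by omega)]
          by_cases hth : t = h
          · rw [if_pos hth, if_pos hth, if_pos hth]
            rw [if_neg (by omega : ¬ (h + 1 ≤ t ∧ t < n)),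
              if_neg (by omega : ¬ (0 ≤ t ∧ t < h + r.toNat + 1 - n))]
            ring
          · rw [if_neg hth, if_neg hth, if_neg hth, pvMod_shift h n t hlt htl hth]
            split_ifs <;> push_cast <;> omega
    rw [hd]
    set kn := (if 0 < r then r.toNat else n - 1) with hkn
    have hkeq : (h : Int) + (if 0 < r then r else (n : Int) - 1) = ((h + kn : Nat) : Int) := by
      rw [hkn]
      split_ifs <;> push_cast <;> omega
    rw [hkeq, Int.toNat_natCast]
    by_cases hbr : h + kn < n
    · rw [if_pos hbr, if_pos (by exact_mod_cast hbr : ((h + kn : Nat) : Int) < (n : Int))]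
      exact pvCapture_eq_alt n _ _
    · rw [if_neg hbr, if_neg (by exact_mod_cast hbr : ¬ ((h + kn : Nat) : Int) < (n : Int))]
  · -- no stones: the while loop never runs, and B takes its early branch
    rw [pvLoop_nonpos h n (stones.toNat + 1) _ stones (by omega)]
    rw [if_pos (by omega : stones ≤ 0)]
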